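-- pv_equiv track=rewrite | github.com/djamro2/CS411-VegeCheck | scripts/cheating_detection/detect_utils_copy.py | compare_answers
-- ===== SOURCE A (Python) =====
-- def compare_answers(answer1, answer2, threshhold):
--     count = 0
--     for i in answer1:
--         for j in answer2:
--             if i == j:
--                 count = count + 1
--     if count >= threshhold:
--         return True
--     else:
--         return False
-- ===== SOURCE B (Python) =====
-- def compare_answers(answer1, answer2, threshhold):
--     c1 = {}
--     for x in answer1:
--         c1[x] = c1.get(x, 0) + 1
--     c2 = {}
--     for y in answer2:
--         c2[y] = c2.get(y, 0) + 1
--     count = sum(v * c2.get(k, 0) for k, v in c1.items())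
--     return count >= threshhold
-- ===== Notes on version B (the rewrite author's own statement) =====
-- stated objective: faster
-- what changed: Replaced the nested O(n*m) pair scan by building frequency dictionaries of both lists once and summing the products of counts over shared keys.
import Mathlib
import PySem

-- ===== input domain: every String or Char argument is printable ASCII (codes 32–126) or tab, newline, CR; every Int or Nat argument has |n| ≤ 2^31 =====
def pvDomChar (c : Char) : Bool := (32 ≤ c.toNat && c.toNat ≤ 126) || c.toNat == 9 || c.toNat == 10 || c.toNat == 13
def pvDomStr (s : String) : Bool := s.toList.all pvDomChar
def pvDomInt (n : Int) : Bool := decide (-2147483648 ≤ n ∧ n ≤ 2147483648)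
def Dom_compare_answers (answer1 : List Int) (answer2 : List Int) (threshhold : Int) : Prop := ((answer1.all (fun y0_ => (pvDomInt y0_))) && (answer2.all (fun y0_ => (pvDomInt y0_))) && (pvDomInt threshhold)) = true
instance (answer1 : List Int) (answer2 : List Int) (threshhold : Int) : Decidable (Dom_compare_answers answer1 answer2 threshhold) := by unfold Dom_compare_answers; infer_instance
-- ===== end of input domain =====

-- B replaces A's nested O(n*m) pair scan by frequency dictionaries built once,
-- summing products of counts over shared keys (faster: asymptotic, O(n+m)).


-- ===== PORT A =====
def compare_answers (answer1 : List Int) (answer2 : List Int) (threshhold : Int) : Bool :=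
  if threshhold ≤ answer1.foldl (fun count i =>
      answer2.foldl (fun count j => if i == j then count + 1 else count) count) 0
  then true else false

-- ===== PORT B =====
def compare_answers_alt (answer1 : List Int) (answer2 : List Int) (threshhold : Int) : Bool :=
  decide (threshhold ≤
    (((answer1.foldl (fun d x => d.insert x (d.getD x 0 + 1))
        (PySem.Dict.empty : PySem.Dict Int Int)).items).map
      (fun p => p.2 *
        (answer2.foldl (fun d y => d.insert y (d.getD y 0 + 1))
          (PySem.Dict.empty : PySem.Dict Int Int)).getD p.1 0)).sum)

-- ===== PRECONDITION & SPEC =====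
def Spec_compare_answers (answer1 : List Int) (answer2 : List Int) (threshhold : Int) (out : Bool) : Prop := out = compare_answers_alt answer1 answer2 threshhold
instance (answer1 : List Int) (answer2 : List Int) (threshhold : Int) (out : Bool) : Decidable (Spec_compare_answers answer1 answer2 threshhold out) := by unfold Spec_compare_answers; infer_instance

-- ===== CLAIM (what is proved, stated in full; the proofs are below) =====
def Claim_equal_compare_answers : Prop := ∀ (answer1 : List Int) (answer2 : List Int) (threshhold : Int), Dom_compare_answers answer1 answer2 threshhold → Spec_compare_answers answer1 answer2 threshhold (compare_answers answer1 answer2 threshhold)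

-- ===== LEMMAS AND PROOFS =====

-- In a duplicate-free list containing x, the 0/x-indicator sum picks out c once.
theorem sum_ite_nodup (S : List Int) (x : Int) (c : Int)
    (hn : S.Nodup) (hx : x ∈ S) :
    (S.map (fun k => if k = x then c else 0)).sum = c := by
  induction S with
  | nil => cases hx
  | cons y S ih =>
    by_cases hxy : y = x
    · subst hxy
      have hnot : y ∉ S := (List.nodup_cons.mp hn).1
      simp only [List.map_cons, List.sum_cons]
      have hz : (S.map (fun k => if k = y then c else 0)).sum = 0 := by
        have hall : ∀ k ∈ S, (if k = y then c else 0) = 0 := by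
          intro k hk; rw [if_neg]; intro h; exact hnot (h ▸ hk)
        rw [List.map_congr_left hall]; simp
      simp [hz]
    · have hxS : x ∈ S := by
        rcases List.mem_cons.mp hx with h | h
        · exact absurd h.symm hxy
        · exact h
      simp only [List.map_cons, List.sum_cons, if_neg hxy]
      rw [ih (List.nodup_cons.mp hn).2 hxS]; omega

-- Grouping a sum by distinct values: Σ_{k ∈ set(l)} count(l,k)·f(k) = Σ_{i ∈ l} f(i).
theorem sum_count_mul (l : List Int) (f : Int → Int) :
    ((PySem.Set.ofList l).map (fun k => (l.count k : Int) * f k)).sum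
      = (l.map f).sum := by
  induction l using List.reverseRecOn with
  | nil => simp [PySem.Set.ofList]
  | append_singleton l x ih =>
    have hset : PySem.Set.ofList (l ++ [x]) = PySem.Set.add (PySem.Set.ofList l) x := by
      simp [PySem.Set.ofList_eq_foldl]
    by_cases hx : x ∈ l
    · have hadd : PySem.Set.ofList (l ++ [x]) = PySem.Set.ofList l := by
        rw [hset, PySem.Set.add]
        simp [PySem.Set.mem_ofList, hx]
      rw [hadd]
      have hcnt : ∀ k ∈ PySem.Set.ofList l,
          (((l ++ [x]).count k : Int) * f k)
            = (l.count k : Int) * f k + (if k = x then f x else 0) := by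
        intro k _
        rw [List.count_append]
        by_cases h : k = x
        · subst h; simp; ring
        · have : [x].count k = 0 := by
            simp [List.count_singleton]; exact fun hh => h hh.symm
          rw [this, if_neg h]; simp
      rw [List.map_congr_left hcnt]
      have hsplit : ((PySem.Set.ofList l).map
          (fun k => (l.count k : Int) * f k + (if k = x then f x else 0))).sum
          = ((PySem.Set.ofList l).map (fun k => (l.count k : Int) * f k)).sum
            + ((PySem.Set.ofList l).map (fun k => if k = x then f x else 0)).sum := by
        simp [← List.sum_map_add]
      rw [hsplit, ih,
        sum_ite_nodup _ x (f x) (PySem.Set.nodup_ofList l)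
          ((PySem.Set.mem_ofList l x).mpr hx)]
      simp
    · have hadd : PySem.Set.ofList (l ++ [x]) = PySem.Set.ofList l ++ [x] := by
        rw [hset, PySem.Set.add]
        simp [PySem.Set.mem_ofList, hx]
      rw [hadd, List.map_append, List.sum_append]
      have hcnt : ∀ k ∈ PySem.Set.ofList l,
          (((l ++ [x]).count k : Int) * f k) = (l.count k : Int) * f k := by
        intro k hk
        have hkx : k ≠ x := by
          rintro rfl; exact hx ((PySem.Set.mem_ofList l k).mp hk)
        rw [List.count_append]
        have : [x].count k = 0 := by
          simp [List.count_singleton]; exact fun hh => hkx hh.symm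
        rw [this]; simp
      rw [List.map_congr_left hcnt, ih]
      have hz : (List.count x l : Int) = 0 := by
        simp [List.count_eq_zero_of_not_mem hx]
      simp [hz]

-- A's nested loop computes Σ_{i ∈ answer1} count(answer2, i).
theorem countA_eq (answer1 answer2 : List Int) :
    answer1.foldl (fun count i =>
        answer2.foldl (fun count j => if i == j then count + 1 else count) count) 0
      = (answer1.map (fun i => (answer2.count i : Int))).sum := by
  have hinner : ∀ (c : Int) (i : Int),
      answer2.foldl (fun count j => if i == j then count + 1 else count) c
        = c + (answer2.count i : Int) := by
    intro c i
    have hcong : ∀ (c : Int) (j : Int), j ∈ answer2 →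
        (if i == j then c + 1 else c) = (if j == i then c + 1 else c) := by
      intro c j _
      by_cases h : i = j
      · simp [h]
      · have h1 : (i == j) = false := by simp [h]
        have h2 : (j == i) = false := by simp [Ne.symm h]
        rw [h1, h2]
    exact (PySem.List.foldl_congr_mem answer2 _ _ c hcong).trans
      (PySem.List.foldl_beq_add_one answer2 i c)
  calc answer1.foldl (fun count i =>
        answer2.foldl (fun count j => if i == j then count + 1 else count) count) 0
      = answer1.foldl (fun count i => count + (answer2.count i : Int)) 0 := by
        exact PySem.List.foldl_congr_mem answer1 _ _ 0
          (fun c i _ => hinner c i)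
    _ = (answer1.map (fun i => (answer2.count i : Int))).sum := by
        rw [PySem.List.foldl_add]; simp

-- ===== VERDICT (by name: the statement is the Claim_ definition above) =====
theorem compare_answers_spec : Claim_equal_compare_answers := by
  intro answer1 answer2 threshhold _
  unfold Spec_compare_answers compare_answers compare_answers_alt
  rw [PySem.Dict.foldl_insert_getD_add_one_eq_counter,
    PySem.Dict.foldl_insert_getD_add_one_eq_counter,
    PySem.Dict.items_counter]
  have hc : ∀ p ∈ (PySem.Set.ofList answer1).map
      (fun k => (k, (answer1.count k : Int))),
      p.2 * (PySem.Dict.counter answer2).getD p.1 0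
        = p.2 * (answer2.count p.1 : Int) := by
    intro p _; rw [PySem.Dict.getD_counter]
  rw [List.map_congr_left hc, countA_eq]
  have : ((PySem.Set.ofList answer1).map
      (fun k => (k, (answer1.count k : Int)))).map
        (fun p => p.2 * (answer2.count p.1 : Int))
      = (PySem.Set.ofList answer1).map
        (fun k => (answer1.count k : Int) * (answer2.count k : Int)) := by
    rw [List.map_map]; rfl
  rw [this, sum_count_mul answer1 (fun k => (answer2.count k : Int))]
  split_ifs with h <;> simp [h]
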